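-- pv_equiv track=rewrite | github.com/fumishiki/deep-generative-models-ja | tools/pad_course1_01_08.py | make_mermaids
-- ===== SOURCE A (Python) =====
-- def mermaid_block(title: str, body: list[str]) -> list[str]:
--     return [f"*mermaid: {title}*", "", "```mermaid", *body, "```", ""]
--
-- def make_mermaids(topic: str, need: int) -> list[list[str]]:
--     # Keep these diagrams simple and generic; they are "maps" for the lecture.
--     bank: dict[str, list[list[str]]] = {
--         "tools": [
--             mermaid_block(
--                 "論文→実装→検算の流れ",
--                 ["flowchart LR", "  P[paper] --> M[math]", "  M --> C[code]", "  C --> S[sanity checks]", "  S --> R[report]", "  R --> P"],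
--             ),
--             mermaid_block(
--                 "GitHub上の知識の置き場",
--                 ["flowchart TD", "  A[repo] --> D[docs/]", "  A --> W[wiki/notes]", "  A --> T[tests/]", "  D --> L[lectures]", "  W --> K[paper notes]"],
--             ),
--             mermaid_block(
--                 "バグの分類",
--                 ["flowchart TD", "  B[bug] --> S[shape]", "  B --> N[numerical]", "  B --> I[indexing]", "  B --> C[concept]", "  S --> F[assert]", "  N --> E[eps/log-sum-exp]"],
--             ),
--         ],
--         "linalg": [
--             mermaid_block(
--                 "線形代数の道具箱",
--                 ["flowchart LR", "  V[vectors] --> M[matrix]", "  M --> D[decomposition]", "  D --> S[SVD/eig/QR]", "  S --> A[approx/solve]", "  A --> ML[ML models]"],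
--             ),
--             mermaid_block(
--                 "shape追跡の作法",
--                 ["flowchart TD", "  X[input] --> Op[linear op]", "  Op --> Y[output]", "  X --> ShX[write shape]", "  Y --> ShY[write shape]", "  ShX --> Check[contract matches]", "  ShY --> Check"],
--             ),
--             mermaid_block(
--                 "数値線形代数の危険",
--                 ["flowchart TD", "  A[ill-conditioned] --> B[small errors]", "  B --> C[big output error]", "  C --> D[wrong gradient]", "  D --> E[training unstable]"],
--             ),
--         ],
--         "prob": [
--             mermaid_block(
--                 "確率モデルの見取り図",
--                 ["flowchart LR", "  X[data] --> P[p(x|θ)]", "  Z[latent] --> P", "  P --> L[loglik]", "  L --> Opt[fit θ]"],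
--             ),
--             mermaid_block(
--                 "ベイズ更新",
--                 ["flowchart LR", "  Prior[p(θ)] --> Post[p(θ|x)]", "  Lik[p(x|θ)] --> Post", "  X[x] --> Lik"],
--             ),
--             mermaid_block(
--                 "推論困難の地図",
--                 ["flowchart TD", "  A[closed form] --> B[exact]", "  A --> C[approx]", "  C --> VI[variational]", "  C --> MC[Monte Carlo]", "  C --> EM[EM]"],
--             ),
--         ],
--         "mc": [
--             mermaid_block(
--                 "Monte Carlo 推定",
--                 ["flowchart LR", "  D[distribution] --> S[samples]", "  S --> A[average]", "  A --> E[estimate E[f(X)]]"],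
--             ),
--             mermaid_block(
--                 "Metropolis-Hastings の流れ",
--                 ["flowchart TD", "  X0[x_t] --> Propose[propose x']", "  Propose --> Acc{accept?}", "  Acc -- yes --> X1[x_{t+1}=x']", "  Acc -- no --> X2[x_{t+1}=x_t]"],
--             ),
--             mermaid_block(
--                 "混合と自己相関",
--                 ["flowchart LR", "  Chain[Markov chain] --> Mix[mixing]", "  Mix --> ESS[effective sample size]", "  ESS --> CI[confidence interval]"],
--             ),
--         ],
--         "infoopt": [
--             mermaid_block(
--                 "損失の分解",
--                 ["flowchart LR", "  CE[cross-entropy] --> H[entropy]", "  CE --> KL[KL divergence]", "  KL --> Opt[optimization]"],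
--             ),
--             mermaid_block(
--                 "最適化ループ",
--                 ["flowchart TD", "  θ[params] --> F[loss]", "  F --> g[grad]", "  g --> Step[update]", "  Step --> θ"],
--             ),
--             mermaid_block(
--                 "数値安定性の要点",
--                 ["flowchart TD", "  A[overflow/underflow] --> B[log-sum-exp]", "  A --> C[eps]", "  A --> D[clipping]", "  B --> E[stable training]"],
--             ),
--         ],
--     }
--
--     # Pick the bank by topic keyword.
--     key = "tools"
--     if topic in {"02", "03"}:
--         key = "linalg"
--     if topic == "04":
--         key = "prob"
--     if topic == "05":
--         key = "mc"
--     if topic in {"06", "07"}: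
--         key = "infoopt"
--     if topic == "01":
--         key = "tools"
--     if topic == "08":
--         key = "prob"
--
--     diags = bank[key]
--     out: list[list[str]] = []
--     i = 0
--     while len(out) < need:
--         out.append(diags[i % len(diags)])
--         i += 1
--     return out
-- ===== SOURCE B (Python) =====
-- # B: the bank is precomputed once as module-level literal block constants and a
-- # topic->diagrams dispatch dict; the while loop becomes divmod-based "q whole
-- # copies plus a prefix of r" instead of appending one modular-indexed element at
-- # a time.
-- _TOOLS = [
--     ["*mermaid: 論文→実装→検算の流れ*", "", "```mermaid", "flowchart LR", "  P[paper] --> M[math]", "  M --> C[code]", "  C --> S[sanity checks]", "  S --> R[report]", "  R --> P", "```", ""],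
--     ["*mermaid: GitHub上の知識の置き場*", "", "```mermaid", "flowchart TD", "  A[repo] --> D[docs/]", "  A --> W[wiki/notes]", "  A --> T[tests/]", "  D --> L[lectures]", "  W --> K[paper notes]", "```", ""],
--     ["*mermaid: バグの分類*", "", "```mermaid", "flowchart TD", "  B[bug] --> S[shape]", "  B --> N[numerical]", "  B --> I[indexing]", "  B --> C[concept]", "  S --> F[assert]", "  N --> E[eps/log-sum-exp]", "```", ""],
-- ]
-- _LINALG = [
--     ["*mermaid: 線形代数の道具箱*", "", "```mermaid", "flowchart LR", "  V[vectors] --> M[matrix]", "  M --> D[decomposition]", "  D --> S[SVD/eig/QR]", "  S --> A[approx/solve]", "  A --> ML[ML models]", "```", ""],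
--     ["*mermaid: shape追跡の作法*", "", "```mermaid", "flowchart TD", "  X[input] --> Op[linear op]", "  Op --> Y[output]", "  X --> ShX[write shape]", "  Y --> ShY[write shape]", "  ShX --> Check[contract matches]", "  ShY --> Check", "```", ""],
--     ["*mermaid: 数値線形代数の危険*", "", "```mermaid", "flowchart TD", "  A[ill-conditioned] --> B[small errors]", "  B --> C[big output error]", "  C --> D[wrong gradient]", "  D --> E[training unstable]", "```", ""],
-- ]
-- _PROB = [
--     ["*mermaid: 確率モデルの見取り図*", "", "```mermaid", "flowchart LR", "  X[data] --> P[p(x|θ)]", "  Z[latent] --> P", "  P --> L[loglik]", "  L --> Opt[fit θ]", "```", ""],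
--     ["*mermaid: ベイズ更新*", "", "```mermaid", "flowchart LR", "  Prior[p(θ)] --> Post[p(θ|x)]", "  Lik[p(x|θ)] --> Post", "  X[x] --> Lik", "```", ""],
--     ["*mermaid: 推論困難の地図*", "", "```mermaid", "flowchart TD", "  A[closed form] --> B[exact]", "  A --> C[approx]", "  C --> VI[variational]", "  C --> MC[Monte Carlo]", "  C --> EM[EM]", "```", ""],
-- ]
-- _MC = [
--     ["*mermaid: Monte Carlo 推定*", "", "```mermaid", "flowchart LR", "  D[distribution] --> S[samples]", "  S --> A[average]", "  A --> E[estimate E[f(X)]]", "```", ""],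
--     ["*mermaid: Metropolis-Hastings の流れ*", "", "```mermaid", "flowchart TD", "  X0[x_t] --> Propose[propose x']", "  Propose --> Acc{accept?}", "  Acc -- yes --> X1[x_{t+1}=x']", "  Acc -- no --> X2[x_{t+1}=x_t]", "```", ""],
--     ["*mermaid: 混合と自己相関*", "", "```mermaid", "flowchart LR", "  Chain[Markov chain] --> Mix[mixing]", "  Mix --> ESS[effective sample size]", "  ESS --> CI[confidence interval]", "```", ""],
-- ]
-- _INFOOPT = [
--     ["*mermaid: 損失の分解*", "", "```mermaid", "flowchart LR", "  CE[cross-entropy] --> H[entropy]", "  CE --> KL[KL divergence]", "  KL --> Opt[optimization]", "```", ""],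
--     ["*mermaid: 最適化ループ*", "", "```mermaid", "flowchart TD", "  θ[params] --> F[loss]", "  F --> g[grad]", "  g --> Step[update]", "  Step --> θ", "```", ""],
--     ["*mermaid: 数値安定性の要点*", "", "```mermaid", "flowchart TD", "  A[overflow/underflow] --> B[log-sum-exp]", "  A --> C[eps]", "  A --> D[clipping]", "  B --> E[stable training]", "```", ""],
-- ]
--
-- _BY_TOPIC = {
--     "01": _TOOLS,
--     "02": _LINALG,
--     "03": _LINALG,
--     "04": _PROB,
--     "05": _MC,
--     "06": _INFOOPT,
--     "07": _INFOOPT,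
--     "08": _PROB,
-- }
--
-- def make_mermaids(topic: str, need: int) -> list[list[str]]:
--     diags = _BY_TOPIC.get(topic, _TOOLS)
--     n = max(need, 0)
--     q, r = divmod(n, len(diags))
--     return diags * q + diags[:r]
-- ===== Notes on version B (the rewrite author's own statement) =====
-- stated objective: alternative
-- what changed: B precomputes the diagram bank once as module-level literal block constants with a direct topic-to-diagrams dispatch dict (A rebuilds the whole bank dict and rechecks a key chain on every call), and replaces the index-accumulating while loop by a divmod closed form: q whole copies of the list plus a prefix of r.
import Mathlib
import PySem

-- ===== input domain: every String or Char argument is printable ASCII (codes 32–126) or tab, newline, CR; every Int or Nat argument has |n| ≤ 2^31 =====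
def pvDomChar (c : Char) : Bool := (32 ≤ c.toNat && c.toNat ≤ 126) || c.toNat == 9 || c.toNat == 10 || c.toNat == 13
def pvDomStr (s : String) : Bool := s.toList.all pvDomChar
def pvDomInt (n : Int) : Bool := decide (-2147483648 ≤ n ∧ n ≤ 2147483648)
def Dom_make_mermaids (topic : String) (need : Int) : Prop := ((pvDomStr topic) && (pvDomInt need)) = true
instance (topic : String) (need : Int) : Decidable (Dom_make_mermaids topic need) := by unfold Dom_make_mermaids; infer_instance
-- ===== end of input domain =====

-- B precomputes the bank as literal per-topic block constants with a topic→diagrams dispatch dict,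
-- and replaces A's index-accumulating while loop by "q whole copies of the list plus a prefix of r"
-- via divmod (same values; no speed claim).

-- ===== PORT A =====
-- A's helper mermaid_block and the bank dict built on every call
def pvMermaidBlock (title : String) (body : List String) : List String :=
  (["*mermaid: " ++ title ++ "*", "", "```mermaid"] ++ body) ++ ["```", ""]

def pvBank : PySem.Dict String (List (List String)) :=
  PySem.Dict.ofList [
    ("tools", [
      pvMermaidBlock "論文→実装→検算の流れ"
        ["flowchart LR", "  P[paper] --> M[math]", "  M --> C[code]", "  C --> S[sanity checks]", "  S --> R[report]", "  R --> P"],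
      pvMermaidBlock "GitHub上の知識の置き場"
        ["flowchart TD", "  A[repo] --> D[docs/]", "  A --> W[wiki/notes]", "  A --> T[tests/]", "  D --> L[lectures]", "  W --> K[paper notes]"],
      pvMermaidBlock "バグの分類"
        ["flowchart TD", "  B[bug] --> S[shape]", "  B --> N[numerical]", "  B --> I[indexing]", "  B --> C[concept]", "  S --> F[assert]", "  N --> E[eps/log-sum-exp]"]]),
    ("linalg", [
      pvMermaidBlock "線形代数の道具箱"
        ["flowchart LR", "  V[vectors] --> M[matrix]", "  M --> D[decomposition]", "  D --> S[SVD/eig/QR]", "  S --> A[approx/solve]", "  A --> ML[ML models]"],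
      pvMermaidBlock "shape追跡の作法"
        ["flowchart TD", "  X[input] --> Op[linear op]", "  Op --> Y[output]", "  X --> ShX[write shape]", "  Y --> ShY[write shape]", "  ShX --> Check[contract matches]", "  ShY --> Check"],
      pvMermaidBlock "数値線形代数の危険"
        ["flowchart TD", "  A[ill-conditioned] --> B[small errors]", "  B --> C[big output error]", "  C --> D[wrong gradient]", "  D --> E[training unstable]"]]),
    ("prob", [
      pvMermaidBlock "確率モデルの見取り図"
        ["flowchart LR", "  X[data] --> P[p(x|θ)]", "  Z[latent] --> P", "  P --> L[loglik]", "  L --> Opt[fit θ]"],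
      pvMermaidBlock "ベイズ更新"
        ["flowchart LR", "  Prior[p(θ)] --> Post[p(θ|x)]", "  Lik[p(x|θ)] --> Post", "  X[x] --> Lik"],
      pvMermaidBlock "推論困難の地図"
        ["flowchart TD", "  A[closed form] --> B[exact]", "  A --> C[approx]", "  C --> VI[variational]", "  C --> MC[Monte Carlo]", "  C --> EM[EM]"]]),
    ("mc", [
      pvMermaidBlock "Monte Carlo 推定"
        ["flowchart LR", "  D[distribution] --> S[samples]", "  S --> A[average]", "  A --> E[estimate E[f(X)]]"],
      pvMermaidBlock "Metropolis-Hastings の流れ"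
        ["flowchart TD", "  X0[x_t] --> Propose[propose x']", "  Propose --> Acc{accept?}", "  Acc -- yes --> X1[x_{t+1}=x']", "  Acc -- no --> X2[x_{t+1}=x_t]"],
      pvMermaidBlock "混合と自己相関"
        ["flowchart LR", "  Chain[Markov chain] --> Mix[mixing]", "  Mix --> ESS[effective sample size]", "  ESS --> CI[confidence interval]"]]),
    ("infoopt", [
      pvMermaidBlock "損失の分解"
        ["flowchart LR", "  CE[cross-entropy] --> H[entropy]", "  CE --> KL[KL divergence]", "  KL --> Opt[optimization]"],
      pvMermaidBlock "最適化ループ"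
        ["flowchart TD", "  θ[params] --> F[loss]", "  F --> g[grad]", "  g --> Step[update]", "  Step --> θ"],
      pvMermaidBlock "数値安定性の要点"
        ["flowchart TD", "  A[overflow/underflow] --> B[log-sum-exp]", "  A --> C[eps]", "  A --> D[clipping]", "  B --> E[stable training]"]])]

-- A's while loop: while len(out) < need: out.append(diags[i % len(diags)]); i += 1
-- (the .getD [] branch of the index is unreachable: diags is nonempty and i % len(diags) is in range)
def mkLoopA (diags : List (List String)) (need : Int) (out : List (List String)) (i : Nat) :
    List (List String) :=
  if (out.length : Int) < need then
    mkLoopA diags need (out ++ [(PySem.List.pyGet? diags ((i % diags.length : Nat) : Int)).getD []]) (i + 1)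
  else out
termination_by (need - out.length).toNat
decreasing_by simp only [List.length_append, List.length_cons, List.length_nil]; omega

def make_mermaids (topic : String) (need : Int) : List (List String) :=
  let key := "tools"
  let key := if topic == "02" || topic == "03" then "linalg" else key
  let key := if topic == "04" then "prob" else key
  let key := if topic == "05" then "mc" else key
  let key := if topic == "06" || topic == "07" then "infoopt" else key
  let key := if topic == "01" then "tools" else key
  let key := if topic == "08" then "prob" else key
  let diags := (pvBank.get? key).getD []   -- bank[key]: key is always present
  mkLoopA diags need [] 0

-- ===== PORT B =====
-- B's module-level precomputed block constants (literal lists, as in Source B)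
def pvTools : List (List String) := [
  ["*mermaid: 論文→実装→検算の流れ*", "", "```mermaid", "flowchart LR", "  P[paper] --> M[math]", "  M --> C[code]", "  C --> S[sanity checks]", "  S --> R[report]", "  R --> P", "```", ""],
  ["*mermaid: GitHub上の知識の置き場*", "", "```mermaid", "flowchart TD", "  A[repo] --> D[docs/]", "  A --> W[wiki/notes]", "  A --> T[tests/]", "  D --> L[lectures]", "  W --> K[paper notes]", "```", ""],
  ["*mermaid: バグの分類*", "", "```mermaid", "flowchart TD", "  B[bug] --> S[shape]", "  B --> N[numerical]", "  B --> I[indexing]", "  B --> C[concept]", "  S --> F[assert]", "  N --> E[eps/log-sum-exp]", "```", ""]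
]

def pvLinalg : List (List String) := [
  ["*mermaid: 線形代数の道具箱*", "", "```mermaid", "flowchart LR", "  V[vectors] --> M[matrix]", "  M --> D[decomposition]", "  D --> S[SVD/eig/QR]", "  S --> A[approx/solve]", "  A --> ML[ML models]", "```", ""],
  ["*mermaid: shape追跡の作法*", "", "```mermaid", "flowchart TD", "  X[input] --> Op[linear op]", "  Op --> Y[output]", "  X --> ShX[write shape]", "  Y --> ShY[write shape]", "  ShX --> Check[contract matches]", "  ShY --> Check", "```", ""],
  ["*mermaid: 数値線形代数の危険*", "", "```mermaid", "flowchart TD", "  A[ill-conditioned] --> B[small errors]", "  B --> C[big output error]", "  C --> D[wrong gradient]", "  D --> E[training unstable]", "```", ""]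
]

def pvProb : List (List String) := [
  ["*mermaid: 確率モデルの見取り図*", "", "```mermaid", "flowchart LR", "  X[data] --> P[p(x|θ)]", "  Z[latent] --> P", "  P --> L[loglik]", "  L --> Opt[fit θ]", "```", ""],
  ["*mermaid: ベイズ更新*", "", "```mermaid", "flowchart LR", "  Prior[p(θ)] --> Post[p(θ|x)]", "  Lik[p(x|θ)] --> Post", "  X[x] --> Lik", "```", ""],
  ["*mermaid: 推論困難の地図*", "", "```mermaid", "flowchart TD", "  A[closed form] --> B[exact]", "  A --> C[approx]", "  C --> VI[variational]", "  C --> MC[Monte Carlo]", "  C --> EM[EM]", "```", ""]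
]

def pvMc : List (List String) := [
  ["*mermaid: Monte Carlo 推定*", "", "```mermaid", "flowchart LR", "  D[distribution] --> S[samples]", "  S --> A[average]", "  A --> E[estimate E[f(X)]]", "```", ""],
  ["*mermaid: Metropolis-Hastings の流れ*", "", "```mermaid", "flowchart TD", "  X0[x_t] --> Propose[propose x']", "  Propose --> Acc{accept?}", "  Acc -- yes --> X1[x_{t+1}=x']", "  Acc -- no --> X2[x_{t+1}=x_t]", "```", ""],
  ["*mermaid: 混合と自己相関*", "", "```mermaid", "flowchart LR", "  Chain[Markov chain] --> Mix[mixing]", "  Mix --> ESS[effective sample size]", "  ESS --> CI[confidence interval]", "```", ""]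
]

def pvInfoopt : List (List String) := [
  ["*mermaid: 損失の分解*", "", "```mermaid", "flowchart LR", "  CE[cross-entropy] --> H[entropy]", "  CE --> KL[KL divergence]", "  KL --> Opt[optimization]", "```", ""],
  ["*mermaid: 最適化ループ*", "", "```mermaid", "flowchart TD", "  θ[params] --> F[loss]", "  F --> g[grad]", "  g --> Step[update]", "  Step --> θ", "```", ""],
  ["*mermaid: 数値安定性の要点*", "", "```mermaid", "flowchart TD", "  A[overflow/underflow] --> B[log-sum-exp]", "  A --> C[eps]", "  A --> D[clipping]", "  B --> E[stable training]", "```", ""]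
]

def pvByTopic : PySem.Dict String (List (List String)) :=
  PySem.Dict.ofList [
    ("01", pvTools), ("02", pvLinalg), ("03", pvLinalg), ("04", pvProb),
    ("05", pvMc), ("06", pvInfoopt), ("07", pvInfoopt), ("08", pvProb)]

-- diags * q + diags[:r] with q, r = divmod(max(need,0), len(diags)); list-by-nonneg-int
-- multiplication ported as flatten ∘ replicate (exact for q ≥ 0, which holds here)
def make_mermaids_alt (topic : String) (need : Int) : List (List String) :=
  let diags := (pvByTopic.get? topic).getD pvTools
  let n := max need 0
  let q := PySem.Int.floordiv n (diags.length : Int)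
  let r := PySem.Int.mod n (diags.length : Int)
  (List.replicate q.toNat diags).flatten ++ diags.take r.toNat

-- ===== PRECONDITION & SPEC =====
def Spec_make_mermaids (topic : String) (need : Int) (out : List (List String)) : Prop := out = make_mermaids_alt topic need
instance (topic : String) (need : Int) (out : List (List String)) : Decidable (Spec_make_mermaids topic need out) := by unfold Spec_make_mermaids; infer_instance

-- ===== CLAIM (what is proved, stated in full; the proofs are below) =====
def Claim_equal_make_mermaids : Prop := ∀ (topic : String) (need : Int), Dom_make_mermaids topic need → Spec_make_mermaids topic need (make_mermaids topic need)

-- ===== LEMMAS AND PROOFS =====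

-- B's diagram list for a topic
def pvDiagsB (topic : String) : List (List String) :=
  (pvByTopic.get? topic).getD pvTools

-- A's key chain selects, through pvBank, exactly B's dispatch value
lemma diags_eq (topic : String) :
    (pvBank.get? (if topic == "08" then "prob"
      else if topic == "01" then "tools"
      else if topic == "06" || topic == "07" then "infoopt"
      else if topic == "05" then "mc"
      else if topic == "04" then "prob"
      else if topic == "02" || topic == "03" then "linalg"
      else "tools")).getD [] = pvDiagsB topic := by
  by_cases h1 : topic = "01"; · subst h1; rfl
  by_cases h2 : topic = "02"; · subst h2; rfl
  by_cases h3 : topic = "03"; · subst h3; rfl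
  by_cases h4 : topic = "04"; · subst h4; rfl
  by_cases h5 : topic = "05"; · subst h5; rfl
  by_cases h6 : topic = "06"; · subst h6; rfl
  by_cases h7 : topic = "07"; · subst h7; rfl
  by_cases h8 : topic = "08"; · subst h8; rfl
  have hitems : pvByTopic.items = [("01", pvTools), ("02", pvLinalg), ("03", pvLinalg),
      ("04", pvProb), ("05", pvMc), ("06", pvInfoopt), ("07", pvInfoopt), ("08", pvProb)] := rfl
  have e1 : ("01" == topic) = false := by simp [Ne.symm h1]
  have e2 : ("02" == topic) = false := by simp [Ne.symm h2]
  have e3 : ("03" == topic) = false := by simp [Ne.symm h3]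
  have e4 : ("04" == topic) = false := by simp [Ne.symm h4]
  have e5 : ("05" == topic) = false := by simp [Ne.symm h5]
  have e6 : ("06" == topic) = false := by simp [Ne.symm h6]
  have e7 : ("07" == topic) = false := by simp [Ne.symm h7]
  have e8 : ("08" == topic) = false := by simp [Ne.symm h8]
  have f1 : (topic == "01") = false := by simp [h1]
  have f2 : (topic == "02") = false := by simp [h2]
  have f3 : (topic == "03") = false := by simp [h3]
  have f4 : (topic == "04") = false := by simp [h4]
  have f5 : (topic == "05") = false := by simp [h5]
  have f6 : (topic == "06") = false := by simp [h6]
  have f7 : (topic == "07") = false := by simp [h7]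
  have f8 : (topic == "08") = false := by simp [h8]
  simp only [pvDiagsB, PySem.Dict.get?, hitems, List.find?, e1, e2, e3, e4, e5, e6, e7, e8,
    f1, f2, f3, f4, f5, f6, f7, f8, Bool.false_or, if_false, Bool.false_eq_true]
  decide

lemma diagsB_len (topic : String) : 0 < (pvDiagsB topic).length := by
  rw [← diags_eq topic]
  split_ifs <;> decide

-- the diagram appended at loop step i of A
def pvElt (d : List (List String)) (i : Nat) : List String :=
  (PySem.List.pyGet? d ((i % d.length : Nat) : Int)).getD []

-- the n diagrams produced by steps i, i+1, …, i+n-1 of A's loop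
def pvCyc (d : List (List String)) : Nat → Nat → List (List String)
  | _, 0 => []
  | i, n + 1 => pvElt d i :: pvCyc d (i + 1) n

lemma mkLoopA_eq (d : List (List String)) (need : Int) :
    ∀ (n : Nat) (out : List (List String)) (i : Nat),
      (need - out.length).toNat = n → mkLoopA d need out i = out ++ pvCyc d i n := by
  intro n
  induction n with
  | zero =>
    intro out i h
    rw [mkLoopA]
    have : ¬ ((out.length : Int) < need) := by omega
    simp [this, pvCyc]
  | succ n ih =>
    intro out i h
    rw [mkLoopA]
    have hlt : (out.length : Int) < need := by omega
    have harg : (need - ((out ++ [(PySem.List.pyGet? d ((i % d.length : Nat) : Int)).getD []]).length : Int)).toNat = n := by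
      simp only [List.length_append, List.length_cons, List.length_nil]; omega
    rw [if_pos hlt, ih _ (i + 1) harg]
    simp [pvCyc, pvElt, List.append_assoc]

lemma pvCyc_small (d : List (List String)) :
    ∀ (n i : Nat), i + n ≤ d.length → pvCyc d i n = (d.drop i).take n := by
  intro n
  induction n with
  | zero => simp [pvCyc]
  | succ n ih =>
    intro i h
    have hi : i < d.length := by omega
    rw [pvCyc, ih (i + 1) (by omega), List.drop_eq_getElem_cons hi, List.take_succ_cons]
    have : i % d.length = i := Nat.mod_eq_of_lt hi
    simp [pvElt, this, hi]

lemma pvCyc_append (d : List (List String)) :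
    ∀ (m n i : Nat), pvCyc d i (m + n) = pvCyc d i m ++ pvCyc d (i + m) n := by
  intro m
  induction m with
  | zero => simp [pvCyc]
  | succ m ih =>
    intro n i
    have : m + 1 + n = (m + n) + 1 := by omega
    rw [this, pvCyc, pvCyc, ih n (i + 1)]
    simp [Nat.add_assoc, Nat.add_comm 1 m]

lemma pvCyc_shift (d : List (List String)) :
    ∀ (n i : Nat), pvCyc d (i + d.length) n = pvCyc d i n := by
  intro n
  induction n with
  | zero => simp [pvCyc]
  | succ n ih =>
    intro i
    rw [pvCyc, pvCyc, ← ih (i + 1)]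
    have : (i + d.length) % d.length = i % d.length := Nat.add_mod_right i d.length
    simp [pvElt, this]
    ring_nf

-- B's closed form "q whole copies plus a prefix of r" equals q*len+r steps of A's cycle
lemma flatten_replicate_take (d : List (List String)) :
    ∀ (q r : Nat), r ≤ d.length →
      (List.replicate q d).flatten ++ d.take r = pvCyc d 0 (q * d.length + r) := by
  intro q
  induction q with
  | zero =>
    intro r hr
    rw [Nat.zero_mul, Nat.zero_add, pvCyc_small d r 0 (by omega)]
    simp
  | succ q ih =>
    intro r hr
    have hsplit : (q + 1) * d.length + r = d.length + (q * d.length + r) := by ring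
    rw [hsplit, pvCyc_append d d.length (q * d.length + r) 0]
    have hsh := pvCyc_shift d (q * d.length + r) 0
    simp only [Nat.zero_add] at hsh ⊢
    rw [hsh, pvCyc_small d d.length 0 (by omega), ← ih r hr]
    simp [List.replicate_succ, List.append_assoc]

lemma loop_eq_closed (d : List (List String)) (hd : 0 < d.length) (need : Int) :
    mkLoopA d need [] 0 =
      (List.replicate (PySem.Int.floordiv (max need 0) (d.length : Int)).toNat d).flatten ++
        d.take (PySem.Int.mod (max need 0) (d.length : Int)).toNat := by
  have hmax : max need 0 = ((need.toNat : Nat) : Int) := by omega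
  rw [hmax, PySem.Int.floordiv_natCast need.toNat d.length,
    PySem.Int.mod_natCast need.toNat d.length]
  have hq : ((need.toNat / d.length : Nat) : Int).toNat = need.toNat / d.length := by
    have := Int.natCast_nonneg (need.toNat / d.length); omega
  have hr : ((need.toNat % d.length : Nat) : Int).toNat = need.toNat % d.length := by
    have := Int.natCast_nonneg (need.toNat % d.length); omega
  rw [hq, hr, flatten_replicate_take d _ _ (le_of_lt (Nat.mod_lt _ hd)),
    show need.toNat / d.length * d.length + need.toNat % d.length = need.toNat from by
      rw [Nat.mul_comm]; exact Nat.div_add_mod need.toNat d.length,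
    mkLoopA_eq d need need.toNat [] 0 (by simp)]
  simp

-- ===== VERDICT (by name: the statement is the Claim_ definition above) =====
theorem make_mermaids_spec : Claim_equal_make_mermaids := by
  intro topic need _
  unfold Spec_make_mermaids make_mermaids make_mermaids_alt
  simp only [diags_eq]
  show mkLoopA (pvDiagsB topic) need [] 0 = _
  exact loop_eq_closed _ (diagsB_len topic) need
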